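-- pv_equiv track=rewrite | github.com/IdrisAdeyemi01/ECX-30_days_of_code | Intermediate/day5_intermediate.py | wedding_chow
-- ===== SOURCE A (Python) =====
-- def wedding_chow(chow):
--     '''
--     This fuction takes in a string representing supplies(as encoded by the problem statement and its known as chow.
--     It outputs a tuple that consist of two element.
--     1. an integer showing the max number of complete supplies
--     2. a string showing leftovers in an order specified in the problem statement (i.e rsmfd)
--     N.B: only lower cases of r,s,m,f and d are considered relevant in the string provided
--     '''
--     if not type(chow) is str:
--         raise TypeError('Only string inputs can be processed')
--     r = []
--     s = []
--     m = []
--     f = []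
--     d = []
--     for i in chow:
--         if i == 'r':
--             r.append(i)
--         elif i == 's':
--             s.append(i)
--         elif i == 'm':
--             m.append(i)
--         elif i == 'f':
--             f.append(i)
--         elif i == 'd':
--             d.append(i)
--     lol = [r,s,m,f,d]
--     num = min([len(i) for i in lol])
--     p = num
--     while p>0:
--         for j in lol:
--             j.pop(p-1)
--         p -= 1
--
--     remainder = []
--     for i in lol:
--         #for k in range(len(lol)):
--         remainder += i
--     leftover = ''.join(remainder)
--     return num, leftover
-- ===== SOURCE B (Python) =====
-- from collections import Counter
--
--
-- def wedding_chow(chow):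
--     if not type(chow) is str:
--         raise TypeError('Only string inputs can be processed')
--     counts = Counter(chow)
--     num = min(counts[c] for c in 'rsmfd')
--     leftover = ''.join(c * (counts[c] - num) for c in 'rsmfd')
--     return num, leftover
-- ===== Notes on version B (the rewrite author's own statement) =====
-- stated objective: simpler
-- what changed: Replaces the five per-letter lists, the descending-index pop loop and the concatenation loop with a single Counter pass: num is the min of the five counts and the leftover string is rebuilt arithmetically as c*(count-num) in rsmfd order.
import Mathlib
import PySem

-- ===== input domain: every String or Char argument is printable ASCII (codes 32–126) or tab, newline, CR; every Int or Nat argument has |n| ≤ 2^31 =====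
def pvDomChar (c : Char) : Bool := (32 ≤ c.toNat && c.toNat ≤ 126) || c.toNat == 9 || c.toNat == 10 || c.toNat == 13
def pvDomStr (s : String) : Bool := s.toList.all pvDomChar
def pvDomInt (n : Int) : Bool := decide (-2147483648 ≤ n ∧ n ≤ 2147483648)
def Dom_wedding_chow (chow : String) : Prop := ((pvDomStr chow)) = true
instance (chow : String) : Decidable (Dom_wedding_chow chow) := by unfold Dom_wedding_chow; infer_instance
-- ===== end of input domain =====

-- B replaces A's five lists, pop loop and concatenation loop by one counting pass and
-- arithmetic reconstruction of the leftovers (objective: simpler).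

-- ===== PORT A =====
-- the per-character dispatch into the five lists
def pvStepA (st : List Char × List Char × List Char × List Char × List Char) (i : Char) :
    List Char × List Char × List Char × List Char × List Char :=
  let (r, s, m, f, d) := st
  if i == 'r' then (r ++ [i], s, m, f, d)
  else if i == 's' then (r, s ++ [i], m, f, d)
  else if i == 'm' then (r, s, m ++ [i], f, d)
  else if i == 'f' then (r, s, m, f ++ [i], d)
  else if i == 'd' then (r, s, m, f, d ++ [i])
  else (r, s, m, f, d)

-- j.pop(p-1); inside A's loop the index is always in range, so the getD branch is unreachable
def pvPopAt (xs : List Char) (i : Nat) : List Char :=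
  ((PySem.List.pop? xs (i : Int)).map (·.2)).getD xs

-- the 'while p > 0: for j in lol: j.pop(p-1); p -= 1' loop
def pvPopLoopA : Nat → List (List Char) → List (List Char)
  | 0, lol => lol
  | p + 1, lol => pvPopLoopA p (lol.map (fun j => pvPopAt j p))

def wedding_chow (chow : String) : Int × String :=
  let (r, s, m, f, d) := chow.toList.foldl pvStepA ([], [], [], [], [])
  let lol := [r, s, m, f, d]
  -- min([len(i) for i in lol]); lol has 5 elements so min never raises (getD unreachable)
  let num : Int := (PySem.List.min? (lol.map (fun i => (i.length : Int))) (fun x => x)).getD 0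
  let lol2 := pvPopLoopA num.toNat lol
  let remainder := lol2.foldl (fun acc i => acc ++ i) ([] : List Char)
  (num, String.ofList remainder)

-- ===== PORT B =====
def wedding_chow_alt (chow : String) : Int × String :=
  let cs := chow.toList
  let cnt := fun c => cs.count c
  let num := min (cnt 'r') (min (cnt 's') (min (cnt 'm') (min (cnt 'f') (cnt 'd'))))
  let leftover := ("rsmfd".toList).flatMap (fun c => List.replicate (cnt c - num) c)
  ((num : Int), String.ofList leftover)

-- ===== PRECONDITION & SPEC =====
def Spec_wedding_chow (chow : String) (out : Int × String) : Prop := out = wedding_chow_alt chow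
instance (chow : String) (out : Int × String) : Decidable (Spec_wedding_chow chow out) := by unfold Spec_wedding_chow; infer_instance

-- ===== CLAIM (what is proved, stated in full; the proofs are below) =====
def Claim_equal_wedding_chow : Prop := ∀ (chow : String), Dom_wedding_chow chow → Spec_wedding_chow chow (wedding_chow chow)

-- ===== LEMMAS AND PROOFS =====

lemma pvRepSnoc (n : Nat) (a : Char) : a :: List.replicate n a = List.replicate n a ++ [a] := by
  rw [← List.replicate_succ, List.replicate_succ']

-- A's filling loop appends exactly count-many copies of each letter
lemma pvFold_eq (cs : List Char) : ∀ r0 s0 m0 f0 d0,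
    cs.foldl pvStepA (r0, s0, m0, f0, d0) =
      (r0 ++ List.replicate (cs.count 'r') 'r',
       s0 ++ List.replicate (cs.count 's') 's',
       m0 ++ List.replicate (cs.count 'm') 'm',
       f0 ++ List.replicate (cs.count 'f') 'f',
       d0 ++ List.replicate (cs.count 'd') 'd') := by
  induction cs with
  | nil => simp
  | cons i t ih =>
    intro r0 s0 m0 f0 d0
    simp only [List.foldl_cons, pvStepA]
    by_cases hr : i = 'r'
    · subst hr; simp [ih, List.replicate_succ', List.append_assoc, pvRepSnoc]
    · by_cases hs : i = 's'
      · subst hs; simp [ih, List.replicate_succ', List.append_assoc, pvRepSnoc]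
      · by_cases hm : i = 'm'
        · subst hm; simp [ih, List.replicate_succ', List.append_assoc, pvRepSnoc]
        · by_cases hf : i = 'f'
          · subst hf; simp [ih, List.replicate_succ', List.append_assoc, pvRepSnoc]
          · by_cases hd : i = 'd'
            · subst hd; simp [ih, List.replicate_succ', List.append_assoc, pvRepSnoc]
            · simp [hr, hs, hm, hf, hd, ih]

lemma pvPopAt_replicate (k i : Nat) (a : Char) (h : i < k) :
    pvPopAt (List.replicate k a) i = List.replicate (k - 1) a := by
  unfold pvPopAt
  rw [PySem.List.pop?_natCast _ i (by simpa using h)]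
  simp [List.eraseIdx_replicate]
  omega

lemma pvPopLoop_replicate : ∀ (p k1 k2 k3 k4 k5 : Nat),
    p ≤ k1 → p ≤ k2 → p ≤ k3 → p ≤ k4 → p ≤ k5 →
    pvPopLoopA p [List.replicate k1 'r', List.replicate k2 's', List.replicate k3 'm',
                  List.replicate k4 'f', List.replicate k5 'd'] =
      [List.replicate (k1 - p) 'r', List.replicate (k2 - p) 's', List.replicate (k3 - p) 'm',
       List.replicate (k4 - p) 'f', List.replicate (k5 - p) 'd'] := by
  intro p
  induction p with
  | zero => intro k1 k2 k3 k4 k5 _ _ _ _ _; simp [pvPopLoopA]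
  | succ q ih =>
    intro k1 k2 k3 k4 k5 h1 h2 h3 h4 h5
    simp only [pvPopLoopA, List.map]
    rw [pvPopAt_replicate _ _ _ (by omega), pvPopAt_replicate _ _ _ (by omega),
        pvPopAt_replicate _ _ _ (by omega), pvPopAt_replicate _ _ _ (by omega),
        pvPopAt_replicate _ _ _ (by omega),
        ih (k1 - 1) (k2 - 1) (k3 - 1) (k4 - 1) (k5 - 1) (by omega) (by omega) (by omega)
          (by omega) (by omega)]
    have hsub : ∀ k : Nat, k - 1 - q = k - (q + 1) := fun k => by omega
    simp [hsub]

-- ===== VERDICT (by name: the statement is the Claim_ definition above) =====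
theorem wedding_chow_spec : Claim_equal_wedding_chow := by
  intro chow _
  unfold Spec_wedding_chow wedding_chow wedding_chow_alt
  rw [pvFold_eq]
  set cs := chow.toList with hcs
  set cr := cs.count 'r'
  set c2 := cs.count 's'
  set c3 := cs.count 'm'
  set c4 := cs.count 'f'
  set c5 := cs.count 'd'
  simp only [List.nil_append, List.map, List.length_replicate, PySem.List.min?_id_cons,
    List.foldl, Option.getD_some]
  have hnum : min (min (min (min (cr : Int) (c2 : Int)) (c3 : Int)) (c4 : Int)) (c5 : Int) =
      ((min cr (min c2 (min c3 (min c4 c5))) : Nat) : Int) := by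
    push_cast
    omega
  rw [hnum]
  set mn := min cr (min c2 (min c3 (min c4 c5))) with hmn
  rw [Int.toNat_natCast mn,
    pvPopLoop_replicate mn cr c2 c3 c4 c5 (by omega) (by omega) (by omega) (by omega) (by omega)]
  simp
  rfl
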